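-- pv_equiv track=rewrite | github.com/derril-tech/ai-financial-analyst | apps/api/app/services/normalization.py | _get_quarter_months
-- ===== SOURCE A (Python) =====
-- def _get_quarter_months(quarter: int, fy_end_month: int) -> list[int]:
--     """Get months for a fiscal quarter."""
--     # Calculate quarter start month
--     q1_start = (fy_end_month + 1) % 12
--     if q1_start == 0:
--         q1_start = 12
--
--     quarter_start = (q1_start + (quarter - 1) * 3 - 1) % 12 + 1
--
--     months = []
--     for i in range(3):
--         month = (quarter_start + i - 1) % 12 + 1
--         months.append(month)
--
--     return months
-- ===== SOURCE B (Python) =====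
-- def _get_quarter_months(quarter: int, fy_end_month: int) -> list[int]:
--     """Get months for a fiscal quarter."""
--     # Full fiscal year, starting with the month after the fiscal-year end.
--     order = [(fy_end_month + m) % 12 + 1 for m in range(12)]
--     start = ((quarter - 1) * 3) % 12
--     return order[start:start + 3]
-- ===== Notes on version B (the rewrite author's own statement) =====
-- stated objective: simpler
-- what changed: B builds the full 12-month fiscal-year table once and extracts the quarter by slicing at ((quarter-1)*3)%12, instead of A's per-quarter start computation with a sentinel fix-up (0->12) and a 3-iteration append loop with per-element modular arithmetic.
import Mathlib
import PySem

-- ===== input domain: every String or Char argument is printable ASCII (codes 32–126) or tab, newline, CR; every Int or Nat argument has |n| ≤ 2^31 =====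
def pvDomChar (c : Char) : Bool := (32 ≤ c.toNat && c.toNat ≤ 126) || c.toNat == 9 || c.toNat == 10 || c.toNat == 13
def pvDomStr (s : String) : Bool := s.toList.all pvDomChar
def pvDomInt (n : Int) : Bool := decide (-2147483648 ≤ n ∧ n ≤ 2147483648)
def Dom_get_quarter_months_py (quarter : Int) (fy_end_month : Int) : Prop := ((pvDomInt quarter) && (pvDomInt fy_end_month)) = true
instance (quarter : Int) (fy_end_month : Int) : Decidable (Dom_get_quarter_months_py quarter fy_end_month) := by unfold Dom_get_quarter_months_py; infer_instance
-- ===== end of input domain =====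

-- B replaces A's per-quarter start arithmetic (with its 0->12 fix-up) and 3-step append
-- loop by building the 12-month fiscal-year table once and slicing out the quarter (simpler).

-- ===== PORT A =====
def get_quarter_months_py (quarter : Int) (fy_end_month : Int) : List Int :=
  let q1_start := PySem.Int.mod (fy_end_month + 1) 12
  let q1_start := if q1_start = 0 then (12 : Int) else q1_start
  let quarter_start := PySem.Int.mod (q1_start + (quarter - 1) * 3 - 1) 12 + 1
  (PySem.List.pyRange 0 3 1).foldl
    (fun months i => months ++ [PySem.Int.mod (quarter_start + i - 1) 12 + 1]) []

-- ===== PORT B =====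
def get_quarter_months_py_alt (quarter : Int) (fy_end_month : Int) : List Int :=
  let order := (PySem.List.pyRange 0 12 1).map (fun m => PySem.Int.mod (fy_end_month + m) 12 + 1)
  let start := PySem.Int.mod ((quarter - 1) * 3) 12
  PySem.List.slice order (some start) (some (start + 3))

-- ===== PRECONDITION & SPEC =====
def Spec_get_quarter_months_py (quarter : Int) (fy_end_month : Int) (out : List Int) : Prop := out = get_quarter_months_py_alt quarter fy_end_month
instance (quarter : Int) (fy_end_month : Int) (out : List Int) : Decidable (Spec_get_quarter_months_py quarter fy_end_month out) := by unfold Spec_get_quarter_months_py; infer_instance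

-- ===== CLAIM (what is proved, stated in full; the proofs are below) =====
def Claim_equal_get_quarter_months_py : Prop := ∀ (quarter : Int) (fy_end_month : Int), Dom_get_quarter_months_py quarter fy_end_month → Spec_get_quarter_months_py quarter fy_end_month (get_quarter_months_py quarter fy_end_month)

-- ===== LEMMAS AND PROOFS =====

-- ===== VERDICT (by name: the statement is the Claim_ definition above) =====
theorem get_quarter_months_py_spec : Claim_equal_get_quarter_months_py := by
  intro q fy _
  unfold Spec_get_quarter_months_py get_quarter_months_py get_quarter_months_py_alt
  have hmod : ∀ a : Int, PySem.Int.mod a 12 = a % 12 :=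
    fun a => PySem.Int.mod_eq_emod_of_pos (by omega)
  have h4 : ((q - 1) * 3) % 12 = 0 ∨ ((q - 1) * 3) % 12 = 3 ∨
      ((q - 1) * 3) % 12 = 6 ∨ ((q - 1) * 3) % 12 = 9 := by omega
  simp only [hmod, PySem.List.pyRange, PySem.List.slice]
  rcases h4 with h | h | h | h <;> rw [h] <;>
    simp [List.range_succ] <;> split_ifs <;> omega
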